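-- pv_equiv track=rewrite | github.com/Rilkon/adventofcode | 2025/day04/day04.py | part2
-- ===== SOURCE A (Python) =====
-- DIRS = [(0,1), (1,0), (1,1), (0,-1), (-1,0), (-1, -1), (1,-1), (-1,1)]
--
-- def fewer_than_four_neighbors(pos, grid):
--     return sum(grid.get((pos[0]+dx, pos[1]+dy)) == "@" for dx, dy in DIRS) < 4
--
-- def has_movable_roll(grid):
--     return any(value=="@" and fewer_than_four_neighbors(key, grid) for key, value in grid.items())
--
-- def part2(data):
--     count = 0
--     while has_movable_roll(data):
--         for key, value in data.items():
--             if value == "@" and fewer_than_four_neighbors(key, data):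
--                 data[key] = "."
--                 count += 1
--     return count
-- ===== SOURCE B (Python) =====
-- DIRS = [(0,1), (1,0), (1,1), (0,-1), (-1,0), (-1, -1), (1,-1), (-1,1)]
--
-- def part2(data):
--     # Peel by simultaneous rounds over a set of live '@' positions:
--     # each round removes every live cell with fewer than four live neighbours.
--     alive = {k for k, v in data.items() if v == "@"}
--     count = 0
--     while True:
--         removable = [p for p in alive
--                      if sum((p[0] + dx, p[1] + dy) in alive for dx, dy in DIRS) < 4]
--         if not removable:
--             return count
--         alive.difference_update(removable)
--         count += len(removable)
-- ===== Notes on version B (the rewrite author's own statement) =====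
-- stated objective: alternative
-- what changed: A repeatedly rescans and mutates the dict in place (cells set to '.', a fresh any()-scan before every pass); B extracts the set of live '@' positions once and peels it in simultaneous rounds, removing in each round every live cell with fewer than four live neighbours and counting the removals; a confluence argument (any stable subset survives both processes, and both final sets are stable) proves the counts equal.
import Mathlib
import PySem

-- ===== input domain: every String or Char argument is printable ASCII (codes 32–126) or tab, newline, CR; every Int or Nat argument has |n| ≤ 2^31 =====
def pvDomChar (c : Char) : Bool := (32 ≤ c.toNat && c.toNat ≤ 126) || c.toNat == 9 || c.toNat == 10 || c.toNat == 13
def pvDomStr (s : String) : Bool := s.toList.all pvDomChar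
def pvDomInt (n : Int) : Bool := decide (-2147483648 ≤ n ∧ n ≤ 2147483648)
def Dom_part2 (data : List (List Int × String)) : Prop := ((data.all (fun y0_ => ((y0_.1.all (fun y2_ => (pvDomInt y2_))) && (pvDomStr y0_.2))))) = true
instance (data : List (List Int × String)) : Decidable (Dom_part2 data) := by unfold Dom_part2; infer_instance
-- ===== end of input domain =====

-- B peels in simultaneous rounds over a set of live positions instead of A's repeated
-- rescan-and-mutate passes over the dict (objective: alternative algorithm, same result);
-- A mutates `data` in place (removed cells become ".") while B does not — the equivalence
-- proved here is about the return value.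

-- ===== PORT A =====
def pvDIRS : List (Int × Int) := [(0,1), (1,0), (1,1), (0,-1), (-1,0), (-1,-1), (1,-1), (-1,1)]

-- fewer_than_four_neighbors; `none` = IndexError on pos[0] / pos[1]
def fewerA (pos : List Int) (grid : PySem.Dict (List Int) String) : Option Bool :=
  match PySem.List.pyGet? pos 0, PySem.List.pyGet? pos 1 with
  | some x, some y =>
      some (decide ((pvDIRS.map (fun d =>
        if grid.get? [x + d.1, y + d.2] == some "@" then (1 : Int) else 0)).sum < 4))
  | _, _ => none

-- has_movable_roll: any(...) over grid.items(), short-circuiting; `none` = IndexError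
def hasMovA : List (List Int × String) → PySem.Dict (List Int) String → Option Bool
  | [], _ => some false
  | (k, v) :: rest, g =>
    if v == "@" then
      match fewerA k g with
      | none => none
      | some true => some true
      | some false => hasMovA rest g
    else hasMovA rest g

-- one `for key, value in data.items():` pass of A's while-body.  Only the visited key's
-- value is overwritten, so the value Python reads when it visits a key equals that key's
-- value in the snapshot of items taken at the start of the pass; the pass walks that snapshot.
def passA : List (List Int × String) → PySem.Dict (List Int) String → Int →
    Option (PySem.Dict (List Int) String × Int)
  | [], g, c => some (g, c)
  | (k, v) :: rest, g, c =>
    if v == "@" then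
      match fewerA k g with
      | none => none
      | some true => passA rest (g.insert k ".") (c + 1)
      | some false => passA rest g c
    else passA rest g c

-- number of '@' cells: the termination measure of A's while loop
def atCount (g : PySem.Dict (List Int) String) : Nat :=
  (g.items.filter (fun kv => kv.2 == "@")).length

-- termination lemmas for loopA (cited in its decreasing_by)
lemma pvCountP_map_lt {α : Type} (p : α → Bool) (f : α → α) :
    ∀ (l : List α), (∀ a ∈ l, p (f a) = true → p a = true) →
    ∀ a ∈ l, p a = true → p (f a) = false → (l.map f).countP p < l.countP p := by
  intro l
  induction l with
  | nil => intro _ a ha; simp at ha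
  | cons b t ih =>
    intro hmono a ha hp hnp
    have hmt : ∀ x ∈ t, p (f x) = true → p x = true :=
      fun x hx h => hmono x (List.mem_cons_of_mem _ hx) h
    simp only [List.map_cons, List.countP_cons]
    rcases List.mem_cons.mp ha with rfl | hat
    · have hle : (t.map f).countP p ≤ t.countP p := by
        rw [List.countP_map]
        exact List.countP_mono_left (fun x hx h => hmt x hx h)
      rw [hnp, hp]
      simp only [if_true, Bool.false_eq_true, if_false]
      omega
    · have hlt := ih hmt a hat hp hnp
      have hhead : (if p (f b) = true then 1 else 0) ≤ (if p b = true then 1 else 0) := by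
        by_cases h : p (f b) = true
        · rw [h, hmono b List.mem_cons_self h]
        · simp [h]
      omega

lemma pvAtCount_insert_le (g : PySem.Dict (List Int) String) (k : List Int) :
    atCount (g.insert k ".") ≤ atCount g := by
  unfold atCount
  by_cases hc : g.contains k = true
  · rw [PySem.Dict.items_insert_of_contains _ _ hc,
      ← List.countP_eq_length_filter, ← List.countP_eq_length_filter, List.countP_map]
    apply List.countP_mono_left
    intro a _ h
    by_cases hk : (a.1 == k) = true
    · simp only [Function.comp, hk, if_true] at h
      exact absurd h (by decide)
    · simpa [Function.comp, hk] using h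
  · rw [PySem.Dict.items_insert_of_not_contains _ _ (by simpa using hc)]
    simp

lemma pvAtCount_insert_lt (g : PySem.Dict (List Int) String) (k : List Int)
    (h : (k, "@") ∈ g.items) : atCount (g.insert k ".") < atCount g := by
  have hc : g.contains k = true :=
    (PySem.Dict.contains_iff_mem_keys g k).mpr (List.mem_map_of_mem h)
  unfold atCount
  rw [PySem.Dict.items_insert_of_contains _ _ hc,
    ← List.countP_eq_length_filter, ← List.countP_eq_length_filter]
  refine pvCountP_map_lt _ _ g.items ?_ (k, "@") h rfl (by simp)
  intro a _ ha
  by_cases hk : (a.1 == k) = true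
  · rw [if_pos hk] at ha
    simp at ha
  · rwa [if_neg hk] at ha

lemma pvPassA_le : ∀ (items : List (List Int × String)) (g : PySem.Dict (List Int) String)
    (c : Int) (gc : PySem.Dict (List Int) String × Int),
    passA items g c = some gc → atCount gc.1 ≤ atCount g := by
  intro items
  induction items with
  | nil => intro g c gc h; cases h; exact le_refl _
  | cons kv rest ih =>
    intro g c gc h
    obtain ⟨k, v⟩ := kv
    simp only [passA] at h
    by_cases hv : (v == "@") = true
    · rw [if_pos hv] at h
      rcases hf : fewerA k g with _ | b
      · rw [hf] at h; cases h
      · rw [hf] at h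
        cases b
        · exact ih _ _ _ h
        · exact le_trans (ih _ _ _ h) (pvAtCount_insert_le g k)
    · rw [if_neg hv] at h
      exact ih _ _ _ h

lemma pvPassA_lt : ∀ (items : List (List Int × String)) (g : PySem.Dict (List Int) String)
    (c : Int) (gc : PySem.Dict (List Int) String × Int),
    (∀ kv ∈ items, kv ∈ g.items) → hasMovA items g = some true →
    passA items g c = some gc → atCount gc.1 < atCount g := by
  intro items
  induction items with
  | nil => intro g c gc _ hm; cases hm
  | cons kv rest ih =>
    intro g c gc hmem hm h
    obtain ⟨k, v⟩ := kv
    simp only [hasMovA] at hm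
    simp only [passA] at h
    by_cases hv : (v == "@") = true
    · rw [if_pos hv] at h hm
      rcases hf : fewerA k g with _ | b
      · rw [hf] at hm; cases hm
      · rw [hf] at h hm
        cases b
        · exact ih _ _ _ (fun kv hkv => hmem kv (List.mem_cons_of_mem _ hkv)) hm h
        · have hk : (k, "@") ∈ g.items := by
            have := hmem (k, v) List.mem_cons_self
            rwa [(by simpa using hv : v = "@")] at this
          exact lt_of_le_of_lt (pvPassA_le _ _ _ _ h) (pvAtCount_insert_lt g k hk)
    · rw [if_neg hv] at h hm
      exact ih _ _ _ (fun kv hkv => hmem kv (List.mem_cons_of_mem _ hkv)) hm h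

-- `while has_movable_roll(data):` — one full `for` pass per iteration
def loopA (g : PySem.Dict (List Int) String) (c : Int) : Option Int :=
  match h1 : hasMovA g.items g with
  | none => none
  | some false => some c
  | some true =>
    match h2 : passA g.items g c with
    | none => none
    | some gc => loopA gc.1 gc.2
termination_by atCount g
decreasing_by exact pvPassA_lt _ _ _ _ (fun kv h => h) h1 h2

def part2 (data : List (List Int × String)) : Int :=
  (loopA (PySem.Dict.ofList data) 0).getD 0
-- `.getD 0` is reached only where the Python raises IndexError (those inputs are outside Pre_part2)

-- ===== PORT B =====
-- the neighbour position (p[0]+dx, p[1]+dy); pyGetD's default is never reached on live keys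
-- under Pre_part2 (they have length ≥ 2); on shorter keys Python B raises IndexError like A
def nbrB (p : List Int) (d : Int × Int) : List Int :=
  [PySem.List.pyGetD p 0 0 + d.1, PySem.List.pyGetD p 1 0 + d.2]

-- sum((p[0]+dx, p[1]+dy) in alive for dx, dy in DIRS)
def degB (p : List Int) (alive : PySem.Set (List Int)) : Int :=
  (pvDIRS.map (fun d => if PySem.Set.contains alive (nbrB p d) then (1 : Int) else 0)).sum

-- removable = [p for p in alive if sum(...) < 4] (computed once per round)
def removableB (alive : PySem.Set (List Int)) : List (List Int) :=
  alive.filter (fun p => decide (degB p alive < 4))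

-- termination lemma for loopB (cited in its decreasing_by)
lemma pvDiffLt (alive : PySem.Set (List Int))
    (hne : ¬ (removableB alive).isEmpty = true) :
    (PySem.Set.diff alive (removableB alive)).length < alive.length := by
  rcases hr : removableB alive with _ | ⟨x, rest⟩
  · rw [hr] at hne; simp at hne
  · have hx : x ∈ removableB alive := by rw [hr]; exact List.mem_cons_self
    have hxa : x ∈ alive := (List.mem_filter.mp hx).1
    unfold PySem.Set.diff
    apply List.length_filter_lt_length_iff_exists.mpr
    refine ⟨x, hxa, ?_⟩
    simp only [Bool.not_eq_true', Bool.not_eq_false]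
    exact (PySem.Set.contains_iff _ _).mpr List.mem_cons_self

-- B's `while True:` loop; `removable`'s list order is irrelevant to the result
def loopB (alive : PySem.Set (List Int)) (c : Int) : Int :=
  if (removableB alive).isEmpty then c
  else loopB (PySem.Set.diff alive (removableB alive)) (c + (removableB alive).length)
termination_by alive.length
decreasing_by exact pvDiffLt _ (by assumption)

def part2_alt (data : List (List Int × String)) : Int :=
  loopB (PySem.Set.ofList
    (((PySem.Dict.ofList data).items.filter (fun kv => kv.2 == "@")).map (fun kv => kv.1))) 0

-- ===== PRECONDITION & SPEC =====
-- Pre_part2 excludes exactly the inputs on which the Python A raises IndexError (some '@'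
-- cell whose key tuple has fewer than two coordinates); Python B raises there too.
def Pre_part2 (data : List (List Int × String)) : Prop :=
  ∀ kv ∈ (PySem.Dict.ofList data).items, kv.2 = "@" → 2 ≤ kv.1.length
instance (data : List (List Int × String)) : Decidable (Pre_part2 data) := by
  unfold Pre_part2; infer_instance

def pvWitness_part2 : (List (List Int × String)) :=
  [([0, 0], "@"), ([0, 1], "@"), ([1, 5], "."), ([], ".")]

def Spec_part2 (data : List (List Int × String)) (out : Int) : Prop := out = part2_alt data
instance (data : List (List Int × String)) (out : Int) : Decidable (Spec_part2 data out) := by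
  unfold Spec_part2; infer_instance

-- ===== CLAIM (what is proved, stated in full; the proofs are below) =====
def Claim_equal_part2 : Prop := ∀ (data : List (List Int × String)), Dom_part2 data → Pre_part2 data → Spec_part2 data (part2 data)

-- ===== LEMMAS AND PROOFS =====

-- the list of '@' keys of a grid state, in dict order
def SgA (g : PySem.Dict (List Int) String) : List (List Int) :=
  (g.items.filter (fun kv => kv.2 == "@")).map (fun kv => kv.1)

-- number of live neighbours of p with respect to a live-set S
def degN (S : List (List Int)) (p : List Int) : Nat :=
  (pvDIRS.filter (fun d => decide (nbrB p d ∈ S))).length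

-- S is stable: every cell of S has at least four neighbours in S
def GoodS (S : List (List Int)) : Prop := ∀ p ∈ S, 4 ≤ degN S p

-- every '@' key has length ≥ 2 (what Pre_part2 gives, stated on a grid state)
def LenOK (g : PySem.Dict (List Int) String) : Prop :=
  ∀ p, g.get? p = some "@" → 2 ≤ p.length

lemma atCount_eq (g : PySem.Dict (List Int) String) : atCount g = (SgA g).length := by
  simp [atCount, SgA]

lemma mem_SgA (g : PySem.Dict (List Int) String) (hNK : g.keys.Nodup) (p : List Int) :
    p ∈ SgA g ↔ g.get? p = some "@" := by
  constructor
  · intro hp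
    rcases List.mem_map.mp hp with ⟨kv, hkv, rfl⟩
    have hv : kv.2 = "@" := by simpa using (List.mem_filter.mp hkv).2
    have hmem : (kv.1, kv.2) ∈ g.items := by
      rw [Prod.mk.eta]
      exact (List.mem_filter.mp hkv).1
    rw [hv] at hmem
    exact PySem.Dict.get?_of_mem_items g hmem hNK
  · intro h
    exact List.mem_map.mpr ⟨(p, "@"),
      List.mem_filter.mpr ⟨PySem.Dict.mem_items_of_get?_eq_some g h, by simp⟩, rfl⟩

lemma nodup_SgA (g : PySem.Dict (List Int) String) (hNK : g.keys.Nodup) : (SgA g).Nodup := by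
  unfold SgA
  exact List.Nodup.sublist (List.Sublist.map _ List.filter_sublist) hNK

lemma degN_mono (S T : List (List Int)) (h : ∀ x ∈ S, x ∈ T) (p : List Int) :
    degN S p ≤ degN T p := by
  unfold degN
  rw [← List.countP_eq_length_filter, ← List.countP_eq_length_filter]
  apply List.countP_mono_left
  intro d _ hd
  simp only [decide_eq_true_eq] at hd ⊢
  exact h _ hd

lemma fewerA_eq (g : PySem.Dict (List Int) String) (hNK : g.keys.Nodup)
    (p : List Int) (hp : 2 ≤ p.length) :
    fewerA p g = some (decide (degN (SgA g) p < 4)) := by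
  match p, hp with
  | x :: y :: t, _ =>
    have h0 : PySem.List.pyGet? (x :: y :: t) (0 : Int) = some x := by simp [pysem]
    have h1 : PySem.List.pyGet? (x :: y :: t) (1 : Int) = some y := by simp [pysem]
    have hcnt : List.countP (fun d => g.get? [x + d.1, y + d.2] == some "@") pvDIRS
        = degN (SgA g) (x :: y :: t) := by
      unfold degN
      rw [← List.countP_eq_length_filter]
      apply List.countP_congr
      intro d _
      have hnb : nbrB (x :: y :: t) d = [x + d.1, y + d.2] := by
        simp [nbrB, PySem.List.pyGetD, h0]
      rw [Bool.eq_iff_iff, hnb]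
      simp [mem_SgA g hNK]
    unfold fewerA
    rw [h0, h1]
    show some (decide ((pvDIRS.map (fun d =>
      if g.get? [x + d.1, y + d.2] == some "@" then (1 : Int) else 0)).sum < 4)) = _
    simp only [PySem.List.sum_map_ite_one_zero]
    rw [hcnt]
    congr 1
    rw [decide_eq_decide]
    omega

lemma degB_eq (p : List Int) (S : PySem.Set (List Int)) :
    degB p S = ((degN S p : Nat) : Int) := by
  unfold degB degN
  simp only [PySem.List.sum_map_ite_one_zero]
  rw [← List.countP_eq_length_filter]
  congr 1
  apply List.countP_congr
  intro d _
  rw [Bool.eq_iff_iff]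
  simp

lemma length_succ_of_remove (S S' : List (List Int)) (hS : S.Nodup) (hS' : S'.Nodup)
    (k : List Int) (hk : k ∈ S) (hmem : ∀ p, p ∈ S' ↔ p ∈ S ∧ p ≠ k) :
    S'.length + 1 = S.length := by
  have hk2 : k ∉ S' := fun h => ((hmem k).mp h).2 rfl
  have hperm : S.Perm (k :: S') := by
    rw [List.perm_ext_iff_of_nodup hS (List.nodup_cons.mpr ⟨hk2, hS'⟩)]
    intro a
    constructor
    · intro ha
      by_cases hak : a = k
      · exact hak ▸ List.mem_cons_self
      · exact List.mem_cons_of_mem _ ((hmem a).mpr ⟨ha, hak⟩)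
    · intro ha
      rcases List.mem_cons.mp ha with rfl | hm
      · exact hk
      · exact ((hmem a).mp hm).1
  have hlen := hperm.length_eq
  simp only [List.length_cons] at hlen
  omega

lemma mem_SgA_insert (g : PySem.Dict (List Int) String) (hNK : g.keys.Nodup)
    (k p : List Int) : p ∈ SgA (g.insert k ".") ↔ p ∈ SgA g ∧ p ≠ k := by
  rw [mem_SgA _ (PySem.Dict.nodup_keys_insert g k "." hNK), mem_SgA _ hNK,
    PySem.Dict.get?_insert]
  by_cases hpk : p = k <;> simp [hpk]

lemma hasMovA_false_spec (g : PySem.Dict (List Int) String) :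
    ∀ items, hasMovA items g = some false →
    ∀ kv ∈ items, kv.2 = "@" → fewerA kv.1 g = some false := by
  intro items
  induction items with
  | nil => intro _ kv hkv; simp at hkv
  | cons kv rest ih =>
    intro h kv2 hkv2 hv2
    obtain ⟨k, v⟩ := kv
    simp only [hasMovA] at h
    by_cases hv : (v == "@") = true
    · rw [if_pos hv] at h
      rcases hf : fewerA k g with _ | b
      · rw [hf] at h; cases h
      · rw [hf] at h
        cases b
        · rcases List.mem_cons.mp hkv2 with rfl | hmem
          · exact hf
          · exact ih h kv2 hmem hv2
        · cases h
    · rw [if_neg hv] at h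
      rcases List.mem_cons.mp hkv2 with rfl | hmem
      · exact absurd (by simp [show v = "@" from hv2]) hv
      · exact ih h kv2 hmem hv2

lemma hasMovA_ne_none (g : PySem.Dict (List Int) String) (hNK : g.keys.Nodup) :
    ∀ items, (∀ kv ∈ items, kv.2 = "@" → 2 ≤ (kv.1 : List Int).length) →
    hasMovA items g ≠ none := by
  intro items
  induction items with
  | nil => intro _ h; cases h
  | cons kv rest ih =>
    intro hlen h
    obtain ⟨k, v⟩ := kv
    simp only [hasMovA] at h
    have ihr := ih (fun kv hkv => hlen kv (List.mem_cons_of_mem _ hkv))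
    by_cases hv : (v == "@") = true
    · rw [if_pos hv] at h
      have hk2 : 2 ≤ k.length := hlen (k, v) List.mem_cons_self (by simpa using hv)
      rw [fewerA_eq g hNK k hk2] at h
      cases hdec : decide (degN (SgA g) k < 4)
      · rw [hdec] at h
        exact ihr h
      · rw [hdec] at h
        cases h
    · rw [if_neg hv] at h
      exact ihr h

lemma passA_spec : ∀ (items : List (List Int × String)) (g : PySem.Dict (List Int) String)
    (c : Int), g.keys.Nodup →
    (∀ kv ∈ items, g.get? kv.1 = some kv.2) →
    (items.map (fun kv => kv.1)).Nodup →
    (∀ kv ∈ items, kv.2 = "@" → 2 ≤ (kv.1 : List Int).length) →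
    ∃ g', passA items g c = some (g', c + ((SgA g).length : Int) - ((SgA g').length : Int)) ∧
      g'.keys.Nodup ∧
      (∀ p ∈ SgA g', p ∈ SgA g) ∧
      (∀ T, GoodS T → (∀ x ∈ T, x ∈ SgA g) → ∀ x ∈ T, x ∈ SgA g') := by
  intro items
  induction items with
  | nil =>
    intro g c hNK _ _ _
    exact ⟨g, by simp [passA], hNK, fun p hp => hp, fun T _ hT => hT⟩
  | cons kv rest ih =>
    intro g c hNK hacc hkeys hlen
    obtain ⟨k, v⟩ := kv
    have hkeys2 : (k :: rest.map (fun kv => kv.1)).Nodup := by simpa using hkeys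
    have hacc2 : ∀ kv ∈ rest, g.get? kv.1 = some kv.2 :=
      fun kv h => hacc kv (List.mem_cons_of_mem _ h)
    have hlen2 : ∀ kv ∈ rest, kv.2 = "@" → 2 ≤ (kv.1 : List Int).length :=
      fun kv h hq => hlen kv (List.mem_cons_of_mem _ h) hq
    simp only [passA]
    by_cases hv : (v == "@") = true
    · rw [if_pos hv]
      have hv2 : v = "@" := by simpa using hv
      have hk2 : 2 ≤ k.length := hlen (k, v) List.mem_cons_self hv2
      rw [fewerA_eq g hNK k hk2]
      have hgk : g.get? k = some "@" := by
        have := hacc (k, v) List.mem_cons_self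
        rwa [hv2] at this
      have hkSg : k ∈ SgA g := (mem_SgA g hNK k).mpr hgk
      cases hdec : decide (degN (SgA g) k < 4)
      · obtain ⟨g', heq, hNK', hsub, hpres⟩ :=
          ih g c hNK hacc2 (List.nodup_cons.mp hkeys2).2 hlen2
        exact ⟨g', heq, hNK', hsub, hpres⟩
      · have hlt : degN (SgA g) k < 4 := of_decide_eq_true hdec
        have hNK1 : (g.insert k ".").keys.Nodup := PySem.Dict.nodup_keys_insert g k "." hNK
        have hknotin : k ∉ rest.map (fun kv => kv.1) := (List.nodup_cons.mp hkeys2).1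
        have hacc1 : ∀ kv ∈ rest, (g.insert k ".").get? kv.1 = some kv.2 := by
          intro kv h
          rw [PySem.Dict.get?_insert,
            if_neg (fun hkk => hknotin (by rw [← hkk]; exact List.mem_map_of_mem h))]
          exact hacc2 kv h
        have hmem1 : ∀ p, p ∈ SgA (g.insert k ".") ↔ p ∈ SgA g ∧ p ≠ k := mem_SgA_insert g hNK k
        have hlen1 : (SgA (g.insert k ".")).length + 1 = (SgA g).length :=
          length_succ_of_remove (SgA g) _ (nodup_SgA g hNK) (nodup_SgA _ hNK1) k hkSg hmem1
        obtain ⟨g', heq, hNK', hsub, hpres⟩ :=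
          ih (g.insert k ".") (c + 1) hNK1 hacc1 (List.nodup_cons.mp hkeys2).2 hlen2
        refine ⟨g', ?_, hNK', ?_, ?_⟩
        · rw [heq]
          simp only [Option.some.injEq, Prod.mk.injEq, true_and]
          omega
        · intro p hp
          exact ((hmem1 p).mp (hsub p hp)).1
        · intro T hT hTsub x hx
          refine hpres T hT ?_ x hx
          intro y hy
          have hyk : y ≠ k := by
            intro hyk
            have h4 : 4 ≤ degN T y := hT y hy
            have hmono := degN_mono T (SgA g) hTsub y
            rw [hyk] at h4 hmono
            omega
          exact (hmem1 y).mpr ⟨hTsub y hy, hyk⟩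
    · rw [if_neg hv]
      obtain ⟨g', heq, hNK', hsub, hpres⟩ :=
        ih g c hNK hacc2 (List.nodup_cons.mp hkeys2).2 hlen2
      exact ⟨g', heq, hNK', hsub, hpres⟩

lemma loopA_spec : ∀ (n : Nat) (g : PySem.Dict (List Int) String) (c : Int),
    atCount g ≤ n → g.keys.Nodup → LenOK g →
    ∃ g', loopA g c = some (c + ((SgA g).length : Int) - ((SgA g').length : Int)) ∧
      g'.keys.Nodup ∧ GoodS (SgA g') ∧
      (∀ p ∈ SgA g', p ∈ SgA g) ∧
      (∀ T, GoodS T → (∀ x ∈ T, x ∈ SgA g) → ∀ x ∈ T, x ∈ SgA g') := by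
  intro n
  induction n using Nat.strong_induction_on with
  | _ n ih =>
    intro g c hle hNK hlenok
    have hlenItems : ∀ kv ∈ g.items, kv.2 = "@" → 2 ≤ (kv.1 : List Int).length := by
      intro kv h hq
      have hget : g.get? kv.1 = some kv.2 :=
        PySem.Dict.get?_of_mem_items g (by rwa [Prod.mk.eta]) hNK
      exact hlenok kv.1 (by rwa [hq] at hget)
    rcases h1 : hasMovA g.items g with _ | b
    · exact absurd h1 (hasMovA_ne_none g hNK g.items hlenItems)
    · cases b
      · -- no movable roll: the loop stops
        have hgood : GoodS (SgA g) := by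
          intro p hp
          have hget := (mem_SgA g hNK p).mp hp
          have hp2 : 2 ≤ p.length := hlenok p hget
          have hfew := hasMovA_false_spec g g.items h1 (p, "@")
            (PySem.Dict.mem_items_of_get?_eq_some g hget) rfl
          rw [fewerA_eq g hNK p hp2] at hfew
          have hdec := of_decide_eq_false (Option.some.inj hfew)
          omega
        refine ⟨g, ?_, hNK, hgood, fun p hp => hp, fun T _ hT => hT⟩
        rw [loopA.eq_def]
        split
        · next h => rw [h] at h1; cases h1
        · next h =>
          simp only [Option.some.injEq]
          omega
        · next h => rw [h] at h1; cases h1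
      · -- a movable roll exists: one pass, then recurse
        have hacc : ∀ kv ∈ g.items, g.get? kv.1 = some kv.2 :=
          fun kv h => PySem.Dict.get?_of_mem_items g (by rwa [Prod.mk.eta]) hNK
        obtain ⟨g1, hpass, hNK1, hsub1, hpres1⟩ := passA_spec g.items g c hNK hacc hNK hlenItems
        have hlt : atCount g1 < atCount g :=
          pvPassA_lt g.items g c (g1, _) (fun kv h => h) h1 hpass
        have hlen1 : LenOK g1 := by
          intro p hp
          exact hlenok p ((mem_SgA g hNK p).mp (hsub1 p ((mem_SgA g1 hNK1 p).mpr hp)))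
        obtain ⟨g2, hrec, hNK2, hgood2, hsub2, hpres2⟩ :=
          ih (atCount g1) (lt_of_lt_of_le hlt hle) g1
            (c + ((SgA g).length : Int) - ((SgA g1).length : Int)) (le_refl _) hNK1 hlen1
        refine ⟨g2, ?_, hNK2, hgood2, fun p hp => hsub1 p (hsub2 p hp),
          fun T hT hTs x hx => hpres2 T hT (fun y hy => hpres1 T hT hTs y hy) x hx⟩
        rw [loopA.eq_def]
        split
        · next h => rw [h] at h1; cases h1
        · next h => rw [h] at h1; cases h1
        · next h =>
          split
          · next hp => rw [hp] at hpass; cases hpass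
          · next gc hp =>
            rw [hp] at hpass
            injection hpass with he
            rw [he, hrec]
            have hc1 := atCount_eq g1
            have hc := atCount_eq g
            simp only [Option.some.injEq]
            omega

lemma loopB_spec : ∀ (n : Nat) (alive : PySem.Set (List Int)) (c : Int),
    alive.length ≤ n → alive.Nodup →
    ∃ F : List (List Int), loopB alive c = c + (alive.length : Int) - (F.length : Int) ∧
      F.Nodup ∧ GoodS F ∧
      (∀ p ∈ F, p ∈ alive) ∧
      (∀ T, GoodS T → (∀ x ∈ T, x ∈ alive) → ∀ x ∈ T, x ∈ F) := by
  intro n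
  induction n using Nat.strong_induction_on with
  | _ n ih =>
    intro alive c hle hnd
    by_cases hemp : (removableB alive).isEmpty = true
    · refine ⟨alive, ?_, hnd, ?_, fun p hp => hp, fun T _ hT => hT⟩
      · rw [loopB.eq_def, if_pos hemp]
        omega
      · intro p hp
        have hnr : p ∉ removableB alive := by
          rw [List.isEmpty_iff.mp hemp]
          exact List.not_mem_nil
        have hge : ¬ degB p alive < 4 := fun hlt =>
          hnr (List.mem_filter.mpr ⟨hp, by simpa using hlt⟩)
        rw [degB_eq] at hge
        omega
    · have hsubR : ∀ x ∈ removableB alive, x ∈ alive :=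
        fun x hx => (List.mem_filter.mp hx).1
      have hndD : (PySem.Set.diff alive (removableB alive)).Nodup :=
        PySem.Set.nodup_diff _ _ hnd
      have hmemD : ∀ p, p ∈ PySem.Set.diff alive (removableB alive) ↔
          p ∈ alive ∧ p ∉ removableB alive :=
        fun p => PySem.Set.mem_diff alive (removableB alive) p
      have hlenD : (PySem.Set.diff alive (removableB alive)).length
          + (removableB alive).length = alive.length := by
        unfold PySem.Set.diff removableB
        rw [List.filter_congr (q := fun x => !(decide (degB x alive < 4)))
          (fun x hx => by
            congr 1
            rw [Bool.eq_iff_iff, PySem.Set.contains_iff]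
            simp [List.mem_filter, hx])]
        have := List.length_eq_length_filter_add
          (f := fun x => decide (degB x alive < 4)) (l := alive)
        omega
      have hlt : (PySem.Set.diff alive (removableB alive)).length < alive.length := by
        exact pvDiffLt alive hemp
      obtain ⟨F, hrec, hndF, hgoodF, hsubF, hpresF⟩ :=
        ih (PySem.Set.diff alive (removableB alive)).length (lt_of_lt_of_le hlt hle)
          (PySem.Set.diff alive (removableB alive))
          (c + ((removableB alive).length : Int)) (le_refl _) hndD
      refine ⟨F, ?_, hndF, hgoodF, fun p hp => (hmemD p |>.mp (hsubF p hp)).1, ?_⟩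
      · rw [loopB.eq_def, if_neg hemp, hrec]
        omega
      · intro T hT hTs x hx
        refine hpresF T hT ?_ x hx
        intro y hy
        refine (hmemD y).mpr ⟨hTs y hy, fun hyR => ?_⟩
        have hq : degB y alive < 4 := by
          have := (List.mem_filter.mp hyR).2
          simpa using this
        rw [degB_eq] at hq
        have h4 : 4 ≤ degN T y := hT y hy
        have hmono := degN_mono T alive hTs y
        omega

-- ===== VERDICT (by name: the statement is the Claim_ definition above) =====
theorem part2_spec : Claim_equal_part2 := by
  unfold Claim_equal_part2
  intro data _hdom hpre
  unfold Spec_part2 part2 part2_alt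
  set g0 := PySem.Dict.ofList data with hg0
  have hNK : g0.keys.Nodup := PySem.Dict.nodup_keys_ofList data
  have hlenok : LenOK g0 := by
    intro p hp
    exact hpre (p, "@") (PySem.Dict.mem_items_of_get?_eq_some g0 hp) rfl
  have halive : PySem.Set.ofList
      ((g0.items.filter (fun kv => kv.2 == "@")).map (fun kv => kv.1)) = SgA g0 :=
    PySem.Set.ofList_eq_self_of_nodup _ (nodup_SgA g0 hNK)
  obtain ⟨gA, hA, hNKA, hgoodA, hsubA, hpresA⟩ :=
    loopA_spec (atCount g0) g0 0 (le_refl _) hNK hlenok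
  obtain ⟨F, hB, hndF, hgoodF, hsubF, hpresF⟩ :=
    loopB_spec (SgA g0).length (SgA g0) 0 (le_refl _) (nodup_SgA g0 hNK)
  have h1 : ∀ x ∈ SgA gA, x ∈ F := hpresF (SgA gA) hgoodA hsubA
  have h2 : ∀ x ∈ F, x ∈ SgA gA := hpresA F hgoodF hsubF
  have hperm : (SgA gA).Perm F :=
    (List.perm_ext_iff_of_nodup (nodup_SgA gA hNKA) hndF).mpr (fun a => ⟨h1 a, h2 a⟩)
  have hlen := hperm.length_eq
  rw [halive, hA, hB]
  simp only [Option.getD_some]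
  omega
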